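-- pv_equiv track=rewrite | github.com/eduardohenriquearnold/AdventOfCode | 2021/12/12.py | valid_route_2
-- ===== SOURCE A (Python) =====
-- from typing import DefaultDict
--
-- def valid_route_2(r):
--     '''check if a route is valid: a single small cave can be visited twice, the rest small caves can only be visited once'''
--
--     # count words
--     count = DefaultDict(int)
--     for w in r:
--         count[w] += 1
--
--     # check for repeated small caves
--     greater_two = 0
--     for w, c in count.items():
--         # ignore big caves
--         if w.isupper():
--             continue
--
--         if c == 2:
--             greater_two += 1
--         elif c > 2:
--             return False
--
--     return greater_two <= 1
-- ===== SOURCE B (Python) =====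
-- def valid_route_2(r):
--     '''check if a route is valid: a single small cave can be visited twice, the rest small caves can only be visited once'''
--     # No counting at all: keep only the small caves and compare the list's length
--     # with the size of its set of distinct members.  The difference is the total
--     # number of excess (repeat) visits, which must be at most 1: one cave visited
--     # twice contributes exactly 1, any cave visited three times (or two caves
--     # visited twice) pushes it to 2 or more.
--     small = [w for w in r if not w.isupper()]
--     return len(small) - len(set(small)) <= 1
-- ===== Notes on version B (the rewrite author's own statement) =====
-- stated objective: simpler
-- what changed: Replaced A's count-dict plus threshold scan over the distinct entries by a two-line set-cardinality formula: filter out big caves, then the route is valid iff len(small) - len(set(small)) <= 1, i.e. the total number of excess repeat visits among small caves is at most one.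
import Mathlib
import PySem

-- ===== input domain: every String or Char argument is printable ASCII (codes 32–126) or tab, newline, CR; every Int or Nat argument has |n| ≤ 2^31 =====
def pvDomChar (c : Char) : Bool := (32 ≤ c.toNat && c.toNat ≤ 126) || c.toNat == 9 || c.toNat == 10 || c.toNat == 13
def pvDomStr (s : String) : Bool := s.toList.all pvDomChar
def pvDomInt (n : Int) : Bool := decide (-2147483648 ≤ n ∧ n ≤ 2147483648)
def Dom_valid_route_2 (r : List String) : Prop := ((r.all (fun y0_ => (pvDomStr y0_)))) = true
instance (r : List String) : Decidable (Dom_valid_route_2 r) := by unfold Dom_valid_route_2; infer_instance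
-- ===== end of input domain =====

-- B replaces A's count-dict plus threshold scan over the distinct entries by a set-cardinality
-- formula: filter out big caves, then valid ⟺ len(small) - len(set(small)) ≤ 1.

-- w.isupper(): at least one cased char and no lowercase one — exact on the ASCII domain,
-- where the cased characters are exactly A-Z and a-z. (shared by both ports)
def pyStrIsupper (s : String) : Bool :=
  s.toList.any PySem.Chars.isupper && !s.toList.any PySem.Chars.islower

-- ===== PORT A =====
-- the second loop of A: 'for w, c in count.items(): …' with early return
def validLoopA : List (String × Int) → Int → Bool
  | [], g => decide (g ≤ 1)
  | (w, c) :: rest, g =>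
    if pyStrIsupper w then validLoopA rest g
    else if c == 2 then validLoopA rest (g + 1)
    else if c > 2 then false
    else validLoopA rest g

def valid_route_2 (r : List String) : Bool :=
  let count := r.foldl (fun d w => d.insert w (d.getD w 0 + 1)) PySem.Dict.empty
  validLoopA count.items 0

-- ===== PORT B =====
-- B: keep the small caves, then compare list length with set size (excess repeats ≤ 1)
def valid_route_2_alt (r : List String) : Bool :=
  let small := r.filter (fun w => !pyStrIsupper w)
  decide ((small.length : Int) - ((PySem.Set.ofList small).length : Int) ≤ 1)

-- ===== PRECONDITION & SPEC =====
def Spec_valid_route_2 (r : List String) (out : Bool) : Prop := out = valid_route_2_alt r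
instance (r : List String) (out : Bool) : Decidable (Spec_valid_route_2 r out) := by unfold Spec_valid_route_2; infer_instance

-- ===== CLAIM (what is proved, stated in full; the proofs are below) =====
def Claim_equal_valid_route_2 : Prop := ∀ (r : List String), Dom_valid_route_2 r → Spec_valid_route_2 r (valid_route_2 r)

-- ===== LEMMAS AND PROOFS =====

-- "small cave" predicate
def smallW (w : String) : Bool := !pyStrIsupper w

-- number of distinct small caves visited exactly twice in l
def dblCard (l : List String) : Nat :=
  (l.toFinset.filter (fun k => smallW k = true ∧ l.count k = 2)).card

-- the common functional characterisation: no small cave thrice, at most one small cave twice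
def specRoute (l : List String) : Bool :=
  decide (∀ k ∈ l, smallW k = true → l.count k ≤ 2) && decide (dblCard l ≤ 1)

-- A-side: the items loop over (key, count) pairs, characterised
theorem loopA_eq (cnt : String → Int) : ∀ (ks : List String) (g : Int),
    validLoopA (ks.map (fun k => (k, cnt k))) g =
      (decide (∀ k ∈ ks, smallW k = true → cnt k ≤ 2) &&
       decide (g + (ks.countP (fun k => smallW k && cnt k == 2) : Int) ≤ 1)) := by
  intro ks
  induction ks with
  | nil => intro g; simp [validLoopA]
  | cons k ks ih =>
    intro g
    simp only [List.map_cons, validLoopA, List.countP_cons, List.mem_cons, forall_eq_or_imp]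
    by_cases hu : pyStrIsupper k
    · have hs : smallW k = false := by simp [smallW, hu]
      simp [hu, hs, ih]
    · have hs : smallW k = true := by simp [smallW, hu]
      by_cases h2 : cnt k = 2
      · have hb : (cnt k == 2) = true := by simp [h2]
        simp only [hu, hb, ih, hs, Bool.true_and, Bool.false_eq_true, if_true,
          true_implies]
        rw [show (g + 1 + (ks.countP (fun k => smallW k && cnt k == 2) : Int)) =
            g + ((ks.countP (fun k => smallW k && cnt k == 2) : Int) + 1) by ring]
        refine congrArg₂ (· && ·) ?_ ?_
        · rw [decide_eq_decide]
          constructor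
          · intro h; exact ⟨by omega, h⟩
          · intro h; exact h.2
        · rw [decide_eq_decide]
          push_cast
          constructor <;> intro <;> omega
      · by_cases h3 : cnt k > 2
        · have hb : (cnt k == 2) = false := by simp [h2]
          simp only [hu, hb]
          have : ¬ (cnt k ≤ 2) := by omega
          simp [h3, hs, this]
        · have hb : (cnt k == 2) = false := by simp [h2]
          simp only [hu, if_false, hb, h3, ih]
          have h1 : cnt k ≤ 2 := by omega
          simp [hs, h1]

theorem ofList_toFinset (r : List String) : (PySem.Set.ofList r).toFinset = r.toFinset := by
  ext k; simp [PySem.Set.mem_ofList]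

theorem countP_card (r : List String) (q : String → Bool) :
    (PySem.Set.ofList r).countP q = (r.toFinset.filter (fun k => q k = true)).card := by
  rw [List.countP_eq_length_filter]
  rw [← List.toFinset_card_of_nodup (List.Nodup.filter q (PySem.Set.nodup_ofList r))]
  rw [List.toFinset_filter, ofList_toFinset]

theorem A_eq_spec (r : List String) : valid_route_2 r = specRoute r := by
  show validLoopA (r.foldl (fun d w => d.insert w (d.getD w 0 + 1)) PySem.Dict.empty).items 0
      = specRoute r
  rw [PySem.Dict.foldl_insert_getD_add_one_eq_counter, PySem.Dict.items_counter]
  rw [loopA_eq (fun k => ((r.count k : Nat) : Int))]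
  unfold specRoute dblCard
  refine congrArg₂ (· && ·) ?_ ?_
  · rw [decide_eq_decide]
    constructor
    · intro h k hk hs
      have := h k ((PySem.Set.mem_ofList r k).mpr hk) hs
      omega
    · intro h k hk hs
      have := h k ((PySem.Set.mem_ofList r k).mp hk) hs
      omega
  · rw [decide_eq_decide, countP_card]
    have hf : r.toFinset.filter (fun k => (smallW k && ((r.count k : Nat) : Int) == 2) = true)
            = r.toFinset.filter (fun k => smallW k = true ∧ r.count k = 2) := by
      apply Finset.filter_congr
      intro k _
      simp only [Bool.and_eq_true, beq_iff_eq]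
      constructor
      · rintro ⟨h1, h2⟩; exact ⟨h1, by exact_mod_cast h2⟩
      · rintro ⟨h1, h2⟩; exact ⟨h1, by exact_mod_cast h2⟩
    rw [hf]
    omega

-- ===== B-side lemmas =====

-- count in a filtered list
theorem count_filter' (l : List String) (p : String → Bool) (k : String) :
    (l.filter p).count k = if p k then l.count k else 0 := by
  induction l with
  | nil => simp
  | cons a l ih =>
    by_cases hp : p a
    · by_cases hk : a = k
      · subst hk; simp [hp, ih]
      · simp [hp, hk, ih]
    · by_cases hk : a = k
      · subst hk; simp [hp, ih]
      · simp [hp, hk, ih]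

theorem sum_count_toFinset (l : List String) :
    ∑ k ∈ l.toFinset, l.count k = l.length := by
  simpa using Multiset.toFinset_sum_count_eq (l : Multiset String)

-- length minus number of distinct elements = total excess of repeats
theorem excess_eq (l : List String) :
    l.length - l.toFinset.card = ∑ k ∈ l.toFinset, (l.count k - 1) := by
  have h1 : ∑ k ∈ l.toFinset, (l.count k - 1) + l.toFinset.card
      = ∑ k ∈ l.toFinset, l.count k := by
    rw [Finset.card_eq_sum_ones, ← Finset.sum_add_distrib]
    apply Finset.sum_congr rfl
    intro k hk
    have : 1 ≤ l.count k := List.count_pos_iff.mpr (List.mem_toFinset.mp hk)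
    omega
  rw [sum_count_toFinset] at h1
  omega

-- excess ≤ 1 ⟺ no element thrice and at most one element twice
theorem excess_iff (l : List String) :
    l.length - l.toFinset.card ≤ 1 ↔
      ((∀ k ∈ l, l.count k ≤ 2) ∧ (l.toFinset.filter (fun k => l.count k = 2)).card ≤ 1) := by
  rw [excess_eq]
  constructor
  · intro h
    have hle : ∀ k ∈ l, l.count k ≤ 2 := by
      intro k hk
      have h' : l.count k - 1 ≤ ∑ x ∈ l.toFinset, (l.count x - 1) :=
        Finset.single_le_sum (f := fun x => l.count x - 1)
          (fun i _ => Nat.zero_le _) (List.mem_toFinset.mpr hk)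
      omega
    refine ⟨hle, ?_⟩
    have : (l.toFinset.filter (fun k => l.count k = 2)).card
        ≤ ∑ k ∈ l.toFinset, (l.count k - 1) := by
      rw [Finset.card_filter]
      apply Finset.sum_le_sum
      intro k _
      by_cases h2 : l.count k = 2 <;> simp [h2]
    omega
  · rintro ⟨h2, hc⟩
    have hsum : ∑ k ∈ l.toFinset, (l.count k - 1)
        = (l.toFinset.filter (fun k => l.count k = 2)).card := by
      rw [Finset.card_filter]
      apply Finset.sum_congr rfl
      intro k hk
      have h1 : 1 ≤ l.count k := List.count_pos_iff.mpr (List.mem_toFinset.mp hk)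
      have := h2 k (List.mem_toFinset.mp hk)
      by_cases hc2 : l.count k = 2 <;> simp [hc2]; omega
    omega

theorem B_eq_spec (r : List String) : valid_route_2_alt r = specRoute r := by
  show decide ((((r.filter (fun w => !pyStrIsupper w)).length : Int)
      - ((PySem.Set.ofList (r.filter (fun w => !pyStrIsupper w))).length : Int) ≤ 1))
    = specRoute r
  have hfe : (fun w => !pyStrIsupper w) = smallW := rfl
  rw [hfe]
  set l := r.filter smallW with hl
  have hset : (PySem.Set.ofList l).length = l.toFinset.card := by
    rw [← List.toFinset_card_of_nodup (PySem.Set.nodup_ofList l), ofList_toFinset]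
  have hcard : l.toFinset.card ≤ l.length := l.toFinset_card_le
  have hInt : (((l.length : Int) - (l.toFinset.card : Int) ≤ 1))
      ↔ (l.length - l.toFinset.card ≤ 1) := by omega
  have hcnt : ∀ k, l.count k = if smallW k then r.count k else 0 := fun k =>
    count_filter' r smallW k
  rw [hset]
  unfold specRoute dblCard
  rw [← Bool.decide_and, decide_eq_decide]
  rw [hInt, excess_iff l]
  have hfs : l.toFinset.filter (fun k => l.count k = 2)
      = r.toFinset.filter (fun k => smallW k = true ∧ r.count k = 2) := by
    rw [hl, List.toFinset_filter, Finset.filter_filter]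
    apply Finset.filter_congr
    intro k _
    rw [hcnt k]
    by_cases hs : smallW k = true <;> simp [hs]
  rw [hfs]
  constructor
  · rintro ⟨ha, hb⟩
    refine ⟨?_, hb⟩
    intro k hk hs
    have hkl : k ∈ l := List.mem_filter.mpr ⟨hk, hs⟩
    have := ha k hkl
    rw [hcnt k, if_pos hs] at this
    exact this
  · rintro ⟨ha, hb⟩
    refine ⟨?_, hb⟩
    intro k hk
    have hk' := List.mem_filter.mp hk
    rw [hcnt k, if_pos hk'.2]
    exact ha k hk'.1 hk'.2

-- ===== VERDICT (by name: the statement is the Claim_ definition above) =====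
theorem valid_route_2_spec : Claim_equal_valid_route_2 := by
  intro r _
  unfold Spec_valid_route_2
  rw [A_eq_spec, B_eq_spec]
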